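-- pv_equiv track=rewrite | github.com/HewlettPackard/SHARP | launcher/launcher.py | parse_auto_metrics
-- ===== SOURCE A (Python) =====
-- from typing import Dict, List
--
-- def parse_auto_metrics(output: str) -> Dict[str, List[str]]:
--     """Extract all the metric names and lists of values from output."""
--     metrics: Dict[str, List[str]] = {}
--     for line in output.splitlines():
--         cols = line.split()
--         name = cols[0]
--         if name in metrics:
--             metrics[name].append(cols[1])
--         else:
--             metrics[name] = [cols[1]]
--
--     return(metrics)
-- ===== SOURCE B (Python) =====
-- from typing import Dict, List
--
-- def parse_auto_metrics(output: str) -> Dict[str, List[str]]: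
--     """Extract all the metric names and lists of values from output."""
--     pairs = []
--     for line in output.splitlines():
--         cols = line.split()
--         pairs.append((cols[0], cols[1]))
--     result: Dict[str, List[str]] = {}
--     for name, _ in pairs:
--         if name not in result:
--             result[name] = [v for n, v in pairs if n == name]
--     return result
-- ===== Notes on version B (the rewrite author's own statement) =====
-- stated objective: alternative
-- what changed: Replaces the one-pass incremental dict append with a two-phase strategy: first materialize all (name, value) pairs, then build each group in one shot by filtering the pair list per first-seen name.
import Mathlib
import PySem

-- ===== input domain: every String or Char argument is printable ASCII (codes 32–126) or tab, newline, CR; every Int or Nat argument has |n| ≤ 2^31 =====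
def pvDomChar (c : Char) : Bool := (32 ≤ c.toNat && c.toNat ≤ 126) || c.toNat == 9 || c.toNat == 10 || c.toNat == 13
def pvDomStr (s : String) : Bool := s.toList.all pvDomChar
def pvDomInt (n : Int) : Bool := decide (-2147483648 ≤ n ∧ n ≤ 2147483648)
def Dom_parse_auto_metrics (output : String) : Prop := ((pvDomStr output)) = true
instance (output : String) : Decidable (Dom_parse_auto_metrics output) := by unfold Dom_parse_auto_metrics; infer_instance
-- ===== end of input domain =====

-- B replaces A's one-pass incremental dict-append grouping by a two-phase strategy (materialize
-- all (name, value) pairs, then build each group by filtering the pair list per first-seen name);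
-- objective: alternative (same results, differently shaped algorithm).


-- ===== PORT A =====
-- literal port of A: one loop, dict of lists grown incrementally
-- (cols[0] / cols[1] raise IndexError on lines with < 2 fields: those inputs are outside Pre_;
--  the port reads them with default "" there, which Pre_ rules out)
def parse_auto_metrics (output : String) : List (String × List String) :=
  (PySem.Str.splitlines output |>.foldl
    (fun metrics line =>
      let cols := PySem.Str.split₀ line
      let name := PySem.List.pyGetD cols 0 ""
      if metrics.contains name then
        metrics.modify name [] (· ++ [PySem.List.pyGetD cols 1 ""])
      else
        metrics.insert name [PySem.List.pyGetD cols 1 ""])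
    PySem.Dict.empty).items

-- ===== PORT B =====
-- B-side helper: the materialized (name, value) pair list
def pvPairs (output : String) : List (String × String) :=
  PySem.Str.splitlines output |>.map
    (fun line =>
      let cols := PySem.Str.split₀ line
      (PySem.List.pyGetD cols 0 "", PySem.List.pyGetD cols 1 ""))

def parse_auto_metrics_alt (output : String) : List (String × List String) :=
  let pairs := pvPairs output
  (pairs.foldl
    (fun result p =>
      if result.contains p.1 then result
      else result.insert p.1 ((pairs.filter (fun q => q.1 == p.1)).map (·.2)))
    PySem.Dict.empty).items

-- ===== PRECONDITION & SPEC =====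
-- Pre_ excludes exactly the inputs where Python A raises IndexError: a line with fewer than
-- two whitespace-separated fields (B raises there too).
def Pre_parse_auto_metrics (output : String) : Prop :=
  ∀ line ∈ PySem.Str.splitlines output, 2 ≤ (PySem.Str.split₀ line).length
instance (output : String) : Decidable (Pre_parse_auto_metrics output) := by
  unfold Pre_parse_auto_metrics; infer_instance
def pvWitness_parse_auto_metrics : String := "mem 17 x\ncpu 3\nmem 4"

def Spec_parse_auto_metrics (output : String) (out : List (String × List String)) : Prop := out = parse_auto_metrics_alt output
instance (output : String) (out : List (String × List String)) : Decidable (Spec_parse_auto_metrics output out) := by unfold Spec_parse_auto_metrics; infer_instance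

-- ===== CLAIM (what is proved, stated in full; the proofs are below) =====
def Claim_equal_parse_auto_metrics : Prop := ∀ (output : String), Dom_parse_auto_metrics output → Pre_parse_auto_metrics output → Spec_parse_auto_metrics output (parse_auto_metrics output)

-- ===== LEMMAS AND PROOFS =====

-- the canonical grouped value at a key
def pvVals (L : List (String × String)) (k : String) : List String :=
  (L.filter (fun q => q.1 == k)).map (·.2)

-- A's branch pair (contains → modify-append, else insert) IS the unconditional modify-append step
lemma pvStepA_eq (d : PySem.Dict String (List String)) (name v : String) :
    (if d.contains name then d.modify name [] (· ++ [v]) else d.insert name [v])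
      = d.modify name [] (· ++ [v]) := by
  split_ifs with h
  · rfl
  · have h' : d.contains name = false := by simpa using h
    simp [PySem.Dict.modify, PySem.Dict.getD_of_not_contains d ([] : List String) h']

-- A's dict is the modify-append fold over the pair list
lemma pvA_eq_fold (output : String) :
    parse_auto_metrics output
      = ((pvPairs output).foldl
          (fun d p => d.modify p.1 [] (· ++ [p.2])) PySem.Dict.empty).items := by
  unfold parse_auto_metrics pvPairs
  rw [List.foldl_map]
  congr 2
  funext d line
  exact pvStepA_eq d _ _

-- B's loop from a canonical state: keys accumulate as PySem.Set.update, values are pvVals L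
lemma pvB_inv (L : List (String × String)) (s : List (String × String))
    (K : List String) (hK : K.Nodup) :
    (s.foldl
      (fun result p =>
        if result.contains p.1 then result
        else result.insert p.1 ((L.filter (fun q => q.1 == p.1)).map (·.2)))
      (PySem.Dict.mk (K.map (fun k => (k, pvVals L k))))).items
    = (PySem.Set.update K (s.map (·.1))).map (fun k => (k, pvVals L k)) := by
  induction s generalizing K with
  | nil => rfl
  | cons p t ih =>
    have hkeys : (PySem.Dict.mk (K.map (fun k => (k, pvVals L k)))).keys = K := by
      simp [PySem.Dict.keys, Function.comp_def]
    by_cases hmem : p.1 ∈ K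
    · have hc : (PySem.Dict.mk (K.map (fun k => (k, pvVals L k)))).contains p.1 = true := by
        rw [PySem.Dict.contains_iff_mem_keys, hkeys]; exact hmem
      simp only [List.foldl_cons, hc, if_true, List.map_cons,
        PySem.Set.update_cons, PySem.Set.add_of_mem hmem]
      exact ih K hK
    · have hc : (PySem.Dict.mk (K.map (fun k => (k, pvVals L k)))).contains p.1 = false := by
        rw [Bool.eq_false_iff]
        intro h
        exact hmem (by rw [PySem.Dict.contains_iff_mem_keys, hkeys] at h; exact h)
      have hins : ((PySem.Dict.mk (K.map (fun k => (k, pvVals L k)))).insert p.1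
            ((L.filter (fun q => q.1 == p.1)).map (·.2)))
          = PySem.Dict.mk ((K ++ [p.1]).map (fun k => (k, pvVals L k))) := by
        apply PySem.Dict.ext
        rw [PySem.Dict.items_insert_of_not_contains _ _ hc]
        simp [pvVals]
      simp only [List.foldl_cons, hc, hins, List.map_cons,
        PySem.Set.update_cons, PySem.Set.add_of_not_mem hmem]
      exact ih (K ++ [p.1]) (by simp [List.nodup_append, hK]; intro a ha h; exact hmem (h ▸ ha))

-- ===== VERDICT (by name: the statement is the Claim_ definition above) =====
theorem parse_auto_metrics_spec : Claim_equal_parse_auto_metrics := by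
  intro output _ _
  unfold Spec_parse_auto_metrics
  rw [pvA_eq_fold]
  set L := pvPairs output with hL
  -- A side: keys and values of the modify-fold
  have hnd : (L.foldl (fun d p => d.modify p.1 [] (· ++ [p.2])) PySem.Dict.empty).keys.Nodup := by
    exact PySem.Dict.nodup_keys_foldl_modify_key L Prod.fst [] _ PySem.Dict.empty
      (by simp)
  have hkeys : (L.foldl (fun d p => d.modify p.1 [] (· ++ [p.2])) PySem.Dict.empty).keys
      = PySem.Set.ofList (L.map (·.1)) := by
    rw [PySem.Dict.keys_foldl_modify_key]
    simp [PySem.Dict.keys_empty, PySem.Set.update_nil_left]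
  have hget : ∀ k, (L.foldl (fun d p => d.modify p.1 [] (· ++ [p.2]))
        PySem.Dict.empty).getD k [] = pvVals L k := by
    intro k
    rw [PySem.Dict.getD_foldl_modify_append]
    simp [pvVals, PySem.Dict.getD_empty]
  have hA : (L.foldl (fun d p => d.modify p.1 [] (· ++ [p.2])) PySem.Dict.empty).items
      = (PySem.Set.ofList (L.map (·.1))).map (fun k => (k, pvVals L k)) := by
    rw [PySem.Dict.items_eq_map_keys _ hnd ([] : List String), hkeys]
    exact List.map_congr_left (fun k _ => by rw [hget])
  -- B side
  have hB : parse_auto_metrics_alt output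
      = (PySem.Set.ofList (L.map (·.1))).map (fun k => (k, pvVals L k)) := by
    show (L.foldl _ PySem.Dict.empty).items = _
    have := pvB_inv L L [] List.nodup_nil
    simpa [PySem.Set.update_nil_left, PySem.Dict.empty] using this
  rw [hA, hB]
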